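-- pv_equiv track=rewrite | github.com/lvlcnapps/pumpkin_mode | axes_spawn_generator/graph_verificator.py | compute_exact_outcomes
-- ===== SOURCE A (Python) =====
-- from collections import defaultdict
-- from functools import lru_cache
-- from typing import Dict, List, Tuple
--
-- def iter_set_bits(mask: int):
--     """Yield set bit indices in ascending order."""
--     while mask:
--         lsb = mask & -mask
--         yield lsb.bit_length() - 1
--         mask ^= lsb
--
-- def compute_exact_outcomes(
--     neighbors: List[int],
--     axes_to_spawn: int,
--     include_partials: bool,
-- ) -> Dict[int, int]:
--     """Return map: outcome_mask -> number_of_paths_reaching_it.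
--
--     outcome_mask contains selected vertices for one terminal result.
--     If include_partials=False, only exact-size outcomes (size == axes_to_spawn)
--     are returned. If include_partials=True, dead-end partial outcomes are included.
--     """
--     n = len(neighbors)
--     full_available = (1 << n) - 1
--
--     @lru_cache(maxsize=None)
--     def dfs(available_mask: int, remaining: int) -> Tuple[Tuple[int, int], ...]:
--         if remaining == 0:
--             return ((0, 1),)
--
--         if available_mask == 0:
--             if include_partials:
--                 return ((0, 1),)
--             return tuple()
--
--         merged: Dict[int, int] = defaultdict(int)
--
--         for v in iter_set_bits(available_mask):
--             blocked = (1 << v) | neighbors[v]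
--             next_available = available_mask & ~blocked
--             sub = dfs(next_available, remaining - 1)
--             for submask, cnt in sub:
--                 merged[submask | (1 << v)] += cnt
--
--         if not merged:
--             return tuple()
--         return tuple(sorted(merged.items()))
--
--     return dict(dfs(full_available, axes_to_spawn))
-- ===== SOURCE B (Python) =====
-- def compute_exact_outcomes(neighbors, axes_to_spawn, include_partials):
--     """Forward level-synchronous path accumulation: a dict of partial states
--     (available_mask, selected_mask) -> path_count is expanded one selection at
--     a time; terminal counts are accumulated into `result` and sorted once."""
--     n = len(neighbors)
--     frontier = {((1 << n) - 1, 0): 1}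
--     result = {}
--     remaining = axes_to_spawn
--     while frontier and remaining != 0:
--         # flush dead-end partial states
--         for (avail, sel), cnt in frontier.items():
--             if avail == 0 and include_partials:
--                 result[sel] = result.get(sel, 0) + cnt
--         # expand live states by one selected vertex
--         nxt = {}
--         for (avail, sel), cnt in frontier.items():
--             if avail != 0:
--                 i = 0
--                 m = avail
--                 while m:
--                     if m & 1:
--                         key = (avail & ~((1 << i) | neighbors[i]), sel | (1 << i))
--                         nxt[key] = nxt.get(key, 0) + cnt
--                     m >>= 1
--                     i += 1
--         frontier = nxt
--         remaining -= 1
--     if remaining == 0: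
--         for (avail, sel), cnt in frontier.items():
--             result[sel] = result.get(sel, 0) + cnt
--     return dict(sorted(result.items()))
-- ===== Notes on version B (the rewrite author's own statement) =====
-- stated objective: alternative
-- what changed: A counts outcomes by a memoized backward recursion (dfs over (available,remaining) returning per-subtree counter tuples merged at every level); B replaces it with a forward level-synchronous dynamic program: a frontier dict mapping partial states (available,selected) to path counts is expanded one selection per iteration, terminal counts are accumulated into a result dict and sorted once at the end.
import Mathlib
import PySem

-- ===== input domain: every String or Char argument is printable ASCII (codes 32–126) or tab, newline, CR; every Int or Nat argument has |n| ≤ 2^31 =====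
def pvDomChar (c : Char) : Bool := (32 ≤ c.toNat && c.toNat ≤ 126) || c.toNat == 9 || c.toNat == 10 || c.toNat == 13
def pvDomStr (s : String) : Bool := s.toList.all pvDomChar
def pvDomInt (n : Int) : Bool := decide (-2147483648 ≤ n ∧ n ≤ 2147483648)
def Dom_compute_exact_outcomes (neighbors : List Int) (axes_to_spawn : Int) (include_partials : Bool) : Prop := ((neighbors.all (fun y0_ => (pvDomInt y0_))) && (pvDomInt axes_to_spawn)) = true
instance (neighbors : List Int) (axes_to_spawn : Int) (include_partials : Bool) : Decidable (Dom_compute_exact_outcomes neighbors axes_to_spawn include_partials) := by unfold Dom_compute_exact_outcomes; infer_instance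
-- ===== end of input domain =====

-- B replaces A's memoized backward recursion by a forward level-synchronous path
-- accumulation over a frontier of partial states; objective: alternative algorithm.

-- ===== PORT A =====
-- shared helper: ascending set-bit indices of a machine-nonnegative mask.
-- A's `iter_set_bits` generator (lsb extraction) and B's inline shift loop both
-- yield exactly the set-bit indices in ascending order; this helper is that
-- enumeration (exact on the nonnegative masks both programs apply it to).
def pvBitIdx (m : Nat) (i : Nat) : List Nat :=
  if h : m = 0 then [] else (if m % 2 = 1 then [i] else []) ++ pvBitIdx (m / 2) (i + 1)
  termination_by m
  decreasing_by exact Nat.div_lt_self (Nat.pos_of_ne_zero h) one_lt_two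

def iterSetBits (mask : Int) : List Nat := pvBitIdx mask.toNat 0

-- neighbors[v]; v is a set-bit index of a submask of (1<<n)-1, hence in range
-- whenever either program evaluates it (the default is never produced).
def pvNbr (neighbors : List Int) (v : Nat) : Int := PySem.List.pyGetD neighbors (v : Int) 0

-- A's `dfs`, transliterated; `fuel` is a totalization guard only (depth is
-- bounded by the bit count of `avail`, and the entry supplies more than that).
def pvDfsA (neighbors : List Int) (ip : Bool) : Nat → Int → Int → List (Int × Int)
  | fuel, avail, rem =>
    if rem = 0 then [((0 : Int), (1 : Int))]
    else
      match fuel with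
      | 0 => []
      | f + 1 =>
        if avail = 0 then (if ip then [((0 : Int), (1 : Int))] else [])
        else
          let merged := (iterSetBits avail).foldl (fun d (v : Nat) =>
            let sub := pvDfsA neighbors ip f
              (PySem.Int.band avail (Int.not (PySem.Int.bor ((1 : Int) <<< v) (pvNbr neighbors v)))) (rem - 1)
            sub.foldl (fun d p => d.modify (PySem.Int.bor p.1 ((1 : Int) <<< v)) 0 (· + p.2)) d)
            PySem.Dict.empty
          -- keys are distinct, so Python's lexicographic sort of the items is the sort by key
          if merged.items = [] then [] else PySem.List.sorted merged.items (fun p => p.1) false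

def compute_exact_outcomes (neighbors : List Int) (axes_to_spawn : Int) (include_partials : Bool) : List (Int × Int) :=
  let n := neighbors.length
  pvDfsA neighbors include_partials (n + 2) (((1 : Int) <<< n) - 1) axes_to_spawn

-- ===== PORT B =====
def pvFlushDead (ip : Bool) (items : List ((Int × Int) × Int)) (result : PySem.Dict Int Int) : PySem.Dict Int Int :=
  items.foldl (fun r p => if p.1.1 = 0 ∧ ip = true then r.modify p.1.2 0 (· + p.2) else r) result

def pvExpand (neighbors : List Int) (items : List ((Int × Int) × Int)) : PySem.Dict (Int × Int) Int :=
  items.foldl (fun d p =>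
    if p.1.1 = 0 then d
    else (iterSetBits p.1.1).foldl (fun d (v : Nat) =>
      d.modify (PySem.Int.band p.1.1 (Int.not (PySem.Int.bor ((1 : Int) <<< v) (pvNbr neighbors v))),
                PySem.Int.bor p.1.2 ((1 : Int) <<< v)) 0 (· + p.2)) d)
    PySem.Dict.empty

def pvFlushAll (items : List ((Int × Int) × Int)) (result : PySem.Dict Int Int) : PySem.Dict Int Int :=
  items.foldl (fun r p => r.modify p.1.2 0 (· + p.2)) result

-- the while loop; `fuel` is a totalization guard only (the frontier empties
-- after at most n+1 iterations, and the entry supplies n+2).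
def pvLoopB (neighbors : List Int) (ip : Bool) :
    Nat → PySem.Dict (Int × Int) Int → PySem.Dict Int Int → Int →
    PySem.Dict (Int × Int) Int × PySem.Dict Int Int × Int
  | fuel, frontier, result, rem =>
    if frontier.items = [] ∨ rem = 0 then (frontier, result, rem)
    else
      match fuel with
      | 0 => (frontier, result, rem)
      | f + 1 => pvLoopB neighbors ip f (pvExpand neighbors frontier.items) (pvFlushDead ip frontier.items result) (rem - 1)

def compute_exact_outcomes_alt (neighbors : List Int) (axes_to_spawn : Int) (include_partials : Bool) : List (Int × Int) :=
  let n := neighbors.length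
  let st := pvLoopB neighbors include_partials (n + 2)
    ((PySem.Dict.empty).insert (((1 : Int) <<< n) - 1, (0 : Int)) 1) PySem.Dict.empty axes_to_spawn
  let result := if st.2.2 = 0 then pvFlushAll st.1.items st.2.1 else st.2.1
  -- keys are distinct, so Python's lexicographic sort of the items is the sort by key
  PySem.List.sorted result.items (fun p => p.1) false

-- ===== PRECONDITION & SPEC =====
def Spec_compute_exact_outcomes (neighbors : List Int) (axes_to_spawn : Int) (include_partials : Bool) (out : List (Int × Int)) : Prop := out = compute_exact_outcomes_alt neighbors axes_to_spawn include_partials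
instance (neighbors : List Int) (axes_to_spawn : Int) (include_partials : Bool) (out : List (Int × Int)) : Decidable (Spec_compute_exact_outcomes neighbors axes_to_spawn include_partials out) := by unfold Spec_compute_exact_outcomes; infer_instance

-- ===== CLAIM (what is proved, stated in full; the proofs are below) =====
def Claim_equal_compute_exact_outcomes : Prop := ∀ (neighbors : List Int) (axes_to_spawn : Int) (include_partials : Bool), Dom_compute_exact_outcomes neighbors axes_to_spawn include_partials → Spec_compute_exact_outcomes neighbors axes_to_spawn include_partials (compute_exact_outcomes neighbors axes_to_spawn include_partials)

-- ===== LEMMAS AND PROOFS =====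

-- ---- generic list/sum helpers ----
theorem pvMulSum {β : Type} (l : List β) (f : β → Int) (c : Int) :
    c * (l.map f).sum = (l.map (fun x => c * f x)).sum := by
  induction l with
  | nil => simp
  | cons x t ih => simp [List.map_cons, List.sum_cons, mul_add, ih]

theorem pvSumFlatMap {β γ : Type} (l : List β) (f : β → List γ) (g : γ → Int) :
    ((l.flatMap f).map g).sum = (l.map (fun x => ((f x).map g).sum)).sum := by
  induction l with
  | nil => simp
  | cons x t ih => simp [List.flatMap_cons, ih]

theorem pvSumIteNotMem {κ : Type} [DecidableEq κ] (l : List κ) (w : κ → Int) (a : κ) (ha : a ∉ l) :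
    (l.map (fun x => if x = a then w x else 0)).sum = 0 := by
  induction l with
  | nil => simp
  | cons x t ih =>
    have hx : x ≠ a := by intro h; exact ha (by simp [h])
    have ht : a ∉ t := fun h => ha (List.mem_cons_of_mem _ h)
    simp [hx, ih ht]

theorem pvSumIteMem {κ : Type} [DecidableEq κ] (l : List κ) (w : κ → Int) (a : κ)
    (hnd : l.Nodup) (ha : a ∈ l) :
    (l.map (fun x => if x = a then w x else 0)).sum = w a := by
  induction l with
  | nil => cases ha
  | cons x t ih =>
    rcases List.nodup_cons.mp hnd with ⟨hxt, hndt⟩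
    rcases List.mem_cons.mp ha with h | h
    · subst h
      simp [pvSumIteNotMem t w a hxt]
    · have hx : x ≠ a := fun he => hxt (he ▸ h)
      simp [hx, ih hndt h]

theorem pvSumNonneg' {β : Type} (l : List β) (f : β → Int) (h0 : ∀ x ∈ l, 0 ≤ f x) :
    0 ≤ (l.map f).sum := by
  induction l with
  | nil => simp
  | cons x t ih =>
    have h1 := h0 x List.mem_cons_self
    have h2 := ih (fun y hy => h0 y (List.mem_cons_of_mem _ hy))
    rw [List.map_cons, List.sum_cons]; omega

theorem pvSumNonnegPos {β : Type} (l : List β) (f : β → Int)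
    (h0 : ∀ x ∈ l, 0 ≤ f x) (a : β) (ha : a ∈ l) (hpos : 0 < f a) :
    0 < (l.map f).sum := by
  induction l with
  | nil => cases ha
  | cons x t ih =>
    rw [List.map_cons, List.sum_cons]
    rcases List.mem_cons.mp ha with h | h
    · subst h
      have : 0 ≤ (t.map f).sum := pvSumNonneg' t f (fun y hy => h0 y (List.mem_cons_of_mem _ hy))
      omega
    · have h1 : 0 ≤ f x := h0 x List.mem_cons_self
      have h2 := ih (fun y hy => h0 y (List.mem_cons_of_mem _ hy)) h
      omega

theorem pvPairwiseLt (l : List (Int × Int))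
    (hle : l.Pairwise (fun p q => p.1 ≤ q.1)) (hnd : (l.map Prod.fst).Nodup) :
    l.Pairwise (fun p q => p.1 < q.1) := by
  induction l with
  | nil => exact List.Pairwise.nil
  | cons p t ih =>
    rcases List.pairwise_cons.mp hle with ⟨hp, hpt⟩
    rw [List.map_cons] at hnd
    rcases List.nodup_cons.mp hnd with ⟨hp1, hndt⟩
    refine List.pairwise_cons.mpr ⟨fun q hq => ?_, ih hpt hndt⟩
    have hne : p.1 ≠ q.1 := fun he => hp1 (he ▸ List.mem_map_of_mem hq)
    exact lt_of_le_of_ne (hp q hq) hne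

-- ---- bitwise or: associativity on the nonnegative masks both programs use ----
theorem pvBorNonneg (a b : Int) (ha : 0 ≤ a) (hb : 0 ≤ b) : 0 ≤ PySem.Int.bor a b := by
  rw [PySem.Int.bor_of_nonneg ha hb]; positivity

theorem pvShiftNonneg (v : Nat) : (0 : Int) ≤ (1 : Int) <<< v := by
  rw [Int.shiftLeft_eq]; positivity

theorem pvBorRot (s x p : Int) (hs : 0 ≤ s) (hx : 0 ≤ x) (hp : 0 ≤ p) :
    PySem.Int.bor s (PySem.Int.bor x p) = PySem.Int.bor (PySem.Int.bor s p) x := by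
  rw [PySem.Int.bor_of_nonneg hx hp, PySem.Int.bor_of_nonneg hs hp,
      PySem.Int.bor_of_nonneg hs (by positivity), PySem.Int.bor_of_nonneg (by positivity) hx]
  simp only [Int.toNat_natCast]
  rw [Nat.lor_comm x.toNat p.toNat, Nat.lor_assoc]

-- ---- the canonical weighted counting fold ----
def pvFoldW {κ : Type} [BEq κ] (l : List (κ × Int)) (d : PySem.Dict κ Int) : PySem.Dict κ Int :=
  l.foldl (fun d q => d.modify q.1 0 (· + q.2)) d

theorem pvFoldFilter {κ : Type} {β : Type} [BEq κ] (l : List β) (P : β → Prop) [DecidablePred P]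
    (F : PySem.Dict κ Int → β → PySem.Dict κ Int) (d : PySem.Dict κ Int) :
    l.foldl (fun d x => if P x then F d x else d) d = (l.filter (fun x => decide (P x))).foldl F d := by
  induction l generalizing d with
  | nil => simp
  | cons x t ih =>
    by_cases h : P x <;> simp [h, ih]

theorem pvFoldWGetD {κ : Type} [BEq κ] [LawfulBEq κ] [DecidableEq κ]
    (l : List (κ × Int)) (d : PySem.Dict κ Int) (m : κ) :
    (pvFoldW l d).getD m 0 = d.getD m 0 + (l.map (fun q => if q.1 = m then q.2 else 0)).sum := by
  induction l generalizing d with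
  | nil => simp [pvFoldW]
  | cons q t ih =>
    have step : pvFoldW (q :: t) d = pvFoldW t (d.modify q.1 0 (· + q.2)) := rfl
    rw [step, ih, PySem.Dict.getD_modify, List.map_cons, List.sum_cons]
    by_cases h : q.1 = m
    · subst h; simp; omega
    · have h2 : m ≠ q.1 := fun he => h he.symm
      simp [h, h2]

theorem pvFoldWKeys {κ : Type} [BEq κ] [LawfulBEq κ]
    (l : List (κ × Int)) (d : PySem.Dict κ Int) :
    (pvFoldW l d).keys = PySem.Set.update d.keys (l.map (·.1)) := by
  simpa [pvFoldW] using PySem.Dict.keys_foldl_modify_key l (fun q : κ × Int => q.1) 0 (fun _ q => (· + q.2)) d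

theorem pvFoldWNodup {κ : Type} [BEq κ] [LawfulBEq κ]
    (l : List (κ × Int)) (d : PySem.Dict κ Int) (h : d.keys.Nodup) :
    (pvFoldW l d).keys.Nodup := by
  simpa [pvFoldW] using PySem.Dict.nodup_keys_foldl_modify_key l (fun q : κ × Int => q.1) 0 (fun _ q => (· + q.2)) d h

theorem pvSumItemsModify {κ : Type} [BEq κ] [LawfulBEq κ] [DecidableEq κ]
    (d : PySem.Dict κ Int) (hnd : d.keys.Nodup) (k : κ) (w : Int) (h : κ → Int) :
    ((d.modify k 0 (· + w)).items.map (fun p => p.2 * h p.1)).sum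
      = (d.items.map (fun p => p.2 * h p.1)).sum + w * h k := by
  by_cases hc : d.contains k
  · have hk : k ∈ d.keys := (PySem.Dict.contains_iff_mem_keys _ _).mp hc
    have hkeys : (d.modify k 0 (· + w)).keys = d.keys := by
      rw [PySem.Dict.keys_modify, PySem.Dict.keys_insert_of_contains _ _ hc]
    have hnd' : (d.modify k 0 (· + w)).keys.Nodup := hkeys ▸ hnd
    rw [PySem.Dict.items_eq_map_keys _ hnd' 0, PySem.Dict.items_eq_map_keys d hnd 0, hkeys,
        List.map_map, List.map_map]
    have hcg : ∀ k' ∈ d.keys,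
        ((fun p : κ × Int => p.2 * h p.1) ∘ fun k' => (k', (d.modify k 0 (· + w)).getD k' 0)) k'
          = ((fun p : κ × Int => p.2 * h p.1) ∘ fun k' => (k', d.getD k' 0)) k'
            + (if k' = k then w * h k else 0) := by
      intro k' _
      simp only [Function.comp, PySem.Dict.getD_modify]
      by_cases he : k' = k
      · subst he; simp; ring
      · simp [he]
    rw [List.map_congr_left hcg, PySem.List.sum_map_add_int]
    rw [pvSumIteMem d.keys (fun _ => w * h k) k hnd hk]
  · have hkeys : (d.modify k 0 (· + w)).keys = d.keys ++ [k] := by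
      rw [PySem.Dict.keys_modify, PySem.Dict.keys_insert_of_not_contains _ _ (by simpa using hc)]
    have hnd' : (d.modify k 0 (· + w)).keys.Nodup := by
      rw [hkeys]
      refine List.nodup_append.mpr ⟨hnd, List.nodup_singleton _, ?_⟩
      have hknotin : k ∉ d.keys := fun hk2 => absurd ((PySem.Dict.contains_iff_mem_keys _ _).mpr hk2) hc
      intro x hx y hy hxy
      apply hknotin
      rw [← List.mem_singleton.mp hy, ← hxy]
      exact hx
    rw [PySem.Dict.items_eq_map_keys _ hnd' 0, PySem.Dict.items_eq_map_keys d hnd 0, hkeys,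
        List.map_map, List.map_map, List.map_append, List.sum_append]
    have hknotin : k ∉ d.keys := fun hk => hc ((PySem.Dict.contains_iff_mem_keys _ _).mpr hk)
    have hcg : ∀ k' ∈ d.keys,
        ((fun p : κ × Int => p.2 * h p.1) ∘ fun k' => (k', (d.modify k 0 (· + w)).getD k' 0)) k'
          = ((fun p : κ × Int => p.2 * h p.1) ∘ fun k' => (k', d.getD k' 0)) k' := by
      intro k' hk'
      have he : k' ≠ k := fun heq => hknotin (heq ▸ hk')
      simp [Function.comp, PySem.Dict.getD_modify, he]
    rw [List.map_congr_left hcg]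
    have : (d.modify k 0 (· + w)).getD k 0 = w := by
      rw [PySem.Dict.getD_modify]
      simp [PySem.Dict.getD_of_not_contains _ _ (by simpa using hc)]
    simp [Function.comp, this]

theorem pvFoldWSumItems {κ : Type} [BEq κ] [LawfulBEq κ] [DecidableEq κ]
    (l : List (κ × Int)) (d : PySem.Dict κ Int) (hnd : d.keys.Nodup) (h : κ → Int) :
    ((pvFoldW l d).items.map (fun p => p.2 * h p.1)).sum
      = (d.items.map (fun p => p.2 * h p.1)).sum + (l.map (fun q => q.2 * h q.1)).sum := by
  induction l generalizing d with
  | nil => simp [pvFoldW]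
  | cons q t ih =>
    have step : pvFoldW (q :: t) d = pvFoldW t (d.modify q.1 0 (· + q.2)) := rfl
    have hnd' : (d.modify q.1 0 (· + q.2)).keys.Nodup := by
      rw [PySem.Dict.keys_modify]
      by_cases hc : d.contains q.1
      · rwa [PySem.Dict.keys_insert_of_contains _ _ hc]
      · rw [PySem.Dict.keys_insert_of_not_contains _ _ (by simpa using hc)]
        refine List.nodup_append.mpr ⟨hnd, List.nodup_singleton _, ?_⟩
        have hknotin : q.1 ∉ d.keys := fun hk2 => absurd ((PySem.Dict.contains_iff_mem_keys _ _).mpr hk2) hc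
        intro x hx y hy hxy
        apply hknotin
        rw [← List.mem_singleton.mp hy, ← hxy]
        exact hx
    rw [step, ih _ hnd', pvSumItemsModify d hnd q.1 q.2 h, List.map_cons, List.sum_cons]
    ring

theorem pvFoldWValPos {κ : Type} [BEq κ] [LawfulBEq κ] [DecidableEq κ]
    (l : List (κ × Int)) (d : PySem.Dict κ Int) (hnd : d.keys.Nodup)
    (hd : ∀ p ∈ d.items, 0 < p.2) (hl : ∀ q ∈ l, 0 < q.2) :
    ∀ p ∈ (pvFoldW l d).items, 0 < p.2 := by
  intro p hp
  rcases p with ⟨pk, pv⟩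
  have hnd' : (pvFoldW l d).keys.Nodup := pvFoldWNodup l d hnd
  have hval : (pvFoldW l d).getD pk 0 = pv := PySem.Dict.getD_of_mem_items _ hp hnd' 0
  rw [pvFoldWGetD] at hval
  have hbase : 0 ≤ d.getD pk 0 := by
    by_cases hc : d.contains pk = true
    · have hsome : (d.get? pk).isSome := by
        rw [← PySem.Dict.contains_eq_isSome_get?]; exact hc
      rcases Option.isSome_iff_exists.mp hsome with ⟨v, hv⟩
      have hmem := PySem.Dict.mem_items_of_get?_eq_some _ hv
      have := hd _ hmem
      rw [PySem.Dict.getD_eq_get?_getD, hv]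
      exact le_of_lt this
    · rw [PySem.Dict.getD_of_not_contains _ _ (by simpa using hc)]
  have hterm : ∀ q ∈ l, 0 ≤ (if q.1 = pk then q.2 else 0) := by
    intro q hq
    by_cases hqe : q.1 = pk <;> simp [hqe]
    exact le_of_lt (hl q hq)
  have hsum : 0 ≤ (l.map (fun q => if q.1 = pk then q.2 else 0)).sum := pvSumNonneg' _ _ hterm
  have hkey : pk ∈ (pvFoldW l d).keys := PySem.Dict.mem_keys_of_mem_items _ hp
  rw [pvFoldWKeys] at hkey
  rcases (PySem.Set.mem_update _ _ _).mp hkey with hk | hk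
  · have hc : d.contains pk = true := (PySem.Dict.contains_iff_mem_keys _ _).mpr hk
    have hsome : (d.get? pk).isSome := by
      rw [← PySem.Dict.contains_eq_isSome_get?]; exact hc
    rcases Option.isSome_iff_exists.mp hsome with ⟨v, hv⟩
    have hmem := PySem.Dict.mem_items_of_get?_eq_some _ hv
    have hvpos := hd _ hmem
    have hpos : 0 < d.getD pk 0 := by
      rw [PySem.Dict.getD_eq_get?_getD, hv]; exact hvpos
    simp only at hval hpos ⊢
    omega
  · rcases List.mem_map.mp hk with ⟨q, hq, hqe⟩
    have hpos : 0 < (l.map (fun q => if q.1 = pk then q.2 else 0)).sum := by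
      refine pvSumNonnegPos _ _ hterm q hq ?_
      simp [hqe, hl q hq]
    simp only at hval ⊢
    omega

-- ---- rewriting both programs' dict folds in pvFoldW form ----
def pvChild (neighbors : List Int) (a s : Int) (v : Nat) : Int × Int :=
  (PySem.Int.band a (Int.not (PySem.Int.bor ((1 : Int) <<< v) (pvNbr neighbors v))),
   PySem.Int.bor s ((1 : Int) <<< v))

def pvE (neighbors : List Int) (items : List ((Int × Int) × Int)) : List ((Int × Int) × Int) :=
  items.flatMap (fun p => if p.1.1 = 0 then []
    else (iterSetBits p.1.1).map (fun v => (pvChild neighbors p.1.1 p.1.2 v, p.2)))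

theorem pvExpandEq (neighbors : List Int) (items : List ((Int × Int) × Int)) :
    pvExpand neighbors items = pvFoldW (pvE neighbors items) PySem.Dict.empty := by
  unfold pvExpand pvE pvFoldW
  rw [List.foldl_flatMap]
  congr 1
  funext d p
  by_cases h : p.1.1 = 0 <;> simp [h, List.foldl_map, pvChild]

def pvME (neighbors : List Int) (ip : Bool) (f : Nat) (a rem : Int) : List (Int × Int) :=
  (iterSetBits a).flatMap (fun (v : Nat) =>
    (pvDfsA neighbors ip f (PySem.Int.band a (Int.not (PySem.Int.bor ((1 : Int) <<< v) (pvNbr neighbors v)))) (rem - 1)).map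
      (fun q => (PySem.Int.bor q.1 ((1 : Int) <<< v), q.2)))

theorem pvDfsASucc (neighbors : List Int) (ip : Bool) (f : Nat) (a rem : Int)
    (hrem : rem ≠ 0) (ha : a ≠ 0) :
    pvDfsA neighbors ip (f + 1) a rem =
      (if (pvFoldW (pvME neighbors ip f a rem) PySem.Dict.empty).items = [] then []
       else PySem.List.sorted (pvFoldW (pvME neighbors ip f a rem) PySem.Dict.empty).items (fun p => p.1) false) := by
  have hstep : (iterSetBits a).foldl (fun d (v : Nat) =>
      (pvDfsA neighbors ip f
        (PySem.Int.band a (Int.not (PySem.Int.bor ((1 : Int) <<< v) (pvNbr neighbors v)))) (rem - 1)).foldl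
        (fun d p => d.modify (PySem.Int.bor p.1 ((1 : Int) <<< v)) 0 (· + p.2)) d) PySem.Dict.empty
      = pvFoldW (pvME neighbors ip f a rem) PySem.Dict.empty := by
    unfold pvME pvFoldW
    rw [List.foldl_flatMap]
    congr 1
    funext d v
    rw [List.foldl_map]
  conv_lhs => rw [pvDfsA.eq_def]
  simp only [if_neg hrem, if_neg ha]
  rw [hstep]

-- ---- facts about dfs output: sortedness, positive counts, nonnegative keys ----
theorem pvDfsAFacts (neighbors : List Int) (ip : Bool) :
    ∀ (f : Nat) (a rem : Int),
      (pvDfsA neighbors ip f a rem).Pairwise (fun p q => p.1 < q.1)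
      ∧ (∀ p ∈ pvDfsA neighbors ip f a rem, 0 < p.2 ∧ 0 ≤ p.1) := by
  intro f
  induction f with
  | zero =>
    intro a rem
    by_cases hrem : rem = 0
    · have he : pvDfsA neighbors ip 0 a rem = [((0 : Int), (1 : Int))] := by
        rw [pvDfsA.eq_def]; simp [hrem]
      rw [he]
      exact ⟨by simp, by intro p hp; simp_all⟩
    · have he : pvDfsA neighbors ip 0 a rem = [] := by
        rw [pvDfsA.eq_def]; simp [hrem]
      rw [he]
      exact ⟨by simp, by intro p hp; simp_all⟩
  | succ f ih =>
    intro a rem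
    by_cases hrem : rem = 0
    · have he : pvDfsA neighbors ip (f + 1) a rem = [((0 : Int), (1 : Int))] := by
        rw [pvDfsA.eq_def]; simp [hrem]
      rw [he]
      exact ⟨by simp, by intro p hp; simp_all⟩
    by_cases ha : a = 0
    · have he : pvDfsA neighbors ip (f + 1) a rem
          = (if ip then [((0 : Int), (1 : Int))] else []) := by
        rw [pvDfsA.eq_def]; simp [hrem, ha]
      rw [he]
      cases ip <;> exact ⟨by simp, by intro p hp; simp_all⟩
    rw [pvDfsASucc neighbors ip f a rem hrem ha]
    have hndE : (PySem.Dict.empty : PySem.Dict Int Int).keys.Nodup := by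
      rw [show (PySem.Dict.empty : PySem.Dict Int Int).keys = [] from rfl]; exact List.nodup_nil
    have hsub : ∀ q ∈ pvME neighbors ip f a rem, 0 < q.2 ∧ 0 ≤ q.1 := by
      intro q hq
      rcases List.mem_flatMap.mp hq with ⟨v, _, hq2⟩
      rcases List.mem_map.mp hq2 with ⟨x, hx, he⟩
      have hfx := (ih _ _).2 x hx
      constructor
      · rw [← he]; exact hfx.1
      · rw [← he]; exact pvBorNonneg _ _ hfx.2 (pvShiftNonneg v)
    have hM := pvFoldWNodup (pvME neighbors ip f a rem) PySem.Dict.empty hndE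
    have hvalpos : ∀ p ∈ (pvFoldW (pvME neighbors ip f a rem) PySem.Dict.empty).items, 0 < p.2 :=
      pvFoldWValPos _ _ hndE (by intro p hp; rw [show (PySem.Dict.empty : PySem.Dict Int Int).items = [] from rfl] at hp; cases hp)
        (fun q hq => (hsub q hq).1)
    have hkeyn : ∀ p ∈ (pvFoldW (pvME neighbors ip f a rem) PySem.Dict.empty).items, 0 ≤ p.1 := by
      intro p hp
      have hk := PySem.Dict.mem_keys_of_mem_items _ hp
      rw [pvFoldWKeys] at hk
      have hk2 : p.1 ∈ (pvME neighbors ip f a rem).map (·.1) := by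
        rcases (PySem.Set.mem_update _ _ _).mp hk with h | h
        · rw [show (PySem.Dict.empty : PySem.Dict Int Int).keys = [] from rfl] at h; cases h
        · exact h
      rcases List.mem_map.mp hk2 with ⟨q, hq, he⟩
      rw [← he]
      exact (hsub q hq).2
    split_ifs with hM0
    · exact ⟨List.Pairwise.nil, by intro p hp; cases hp⟩
    constructor
    · have hple := PySem.List.sorted_pairwise
        (pvFoldW (pvME neighbors ip f a rem) PySem.Dict.empty).items (fun p => p.1)
      have hkeys : (pvFoldW (pvME neighbors ip f a rem) PySem.Dict.empty).items.map Prod.fst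
          = (pvFoldW (pvME neighbors ip f a rem) PySem.Dict.empty).keys := rfl
      have hnd2 : ((PySem.List.sorted (pvFoldW (pvME neighbors ip f a rem) PySem.Dict.empty).items
          (fun p => p.1) false).map Prod.fst).Nodup := by
        refine ((PySem.List.sorted_perm _ _ _).map Prod.fst).nodup_iff.mpr ?_
        rw [hkeys]; exact hM
      exact pvPairwiseLt _ hple hnd2
    · intro p hp
      have hpm := (PySem.List.mem_sorted _ _ _ _).mp hp
      exact ⟨hvalpos p hpm, hkeyn p hpm⟩

-- ---- the forward/backward bridge ----
def pvContrib (neighbors : List Int) (ip : Bool) (f : Nat) (a s rem m : Int) : Int :=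
  ((pvDfsA neighbors ip f a rem).map (fun p => if PySem.Int.bor s p.1 = m then p.2 else 0)).sum

def pvFinal (neighbors : List Int) (ip : Bool) (f : Nat) (frontier : PySem.Dict (Int × Int) Int)
    (result : PySem.Dict Int Int) (rem : Int) : PySem.Dict Int Int :=
  let st := pvLoopB neighbors ip f frontier result rem
  if st.2.2 = 0 then pvFlushAll st.1.items st.2.1 else st.2.1


theorem pvSumFilter {β : Type} (l : List β) (P : β → Prop) [DecidablePred P] (g : β → Int) :
    ((l.filter (fun x => decide (P x))).map g).sum = (l.map (fun x => if P x then g x else 0)).sum := by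
  induction l with
  | nil => simp
  | cons x t ih => by_cases h : P x <;> simp [h, ih]

theorem pvFlushAllEq (items : List ((Int × Int) × Int)) (r : PySem.Dict Int Int) :
    pvFlushAll items r = pvFoldW (items.map (fun p => (p.1.2, p.2))) r := by
  unfold pvFlushAll pvFoldW
  rw [List.foldl_map]

theorem pvFlushDeadEq (ip : Bool) (items : List ((Int × Int) × Int)) (r : PySem.Dict Int Int) :
    pvFlushDead ip items r
      = pvFoldW ((items.filter (fun p => decide (p.1.1 = 0 ∧ ip = true))).map (fun p => (p.1.2, p.2))) r := by
  unfold pvFlushDead pvFoldW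
  rw [pvFoldFilter items (fun p => p.1.1 = 0 ∧ ip = true) _ r, List.foldl_map]

theorem pvFoldWSumIte {κ : Type} [BEq κ] [LawfulBEq κ] [DecidableEq κ]
    (l : List (κ × Int)) (g : κ → Prop) [DecidablePred g] :
    ((pvFoldW l PySem.Dict.empty).items.map (fun p => if g p.1 then p.2 else 0)).sum
      = (l.map (fun q => if g q.1 then q.2 else 0)).sum := by
  have hndE : (PySem.Dict.empty : PySem.Dict κ Int).keys.Nodup := by
    rw [show (PySem.Dict.empty : PySem.Dict κ Int).keys = [] from rfl]; exact List.nodup_nil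
  have h1 := pvFoldWSumItems l PySem.Dict.empty hndE (fun k => if g k then (1 : Int) else 0)
  have e : ∀ (L : List (κ × Int)), (L.map (fun p => p.2 * (if g p.1 then (1 : Int) else 0))).sum
      = (L.map (fun p => if g p.1 then p.2 else 0)).sum := by
    intro L
    apply congrArg
    apply List.map_congr_left
    intro p _
    by_cases h : g p.1 <;> simp [h]
  rw [show (PySem.Dict.empty : PySem.Dict κ Int).items = [] from rfl] at h1
  simp only [List.map_nil, List.sum_nil, zero_add] at h1
  rw [← e, h1, e]

theorem pvLoopBZeroU (neighbors : List Int) (ip : Bool) (frontier : PySem.Dict (Int × Int) Int)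
    (result : PySem.Dict Int Int) (rem : Int) :
    pvLoopB neighbors ip 0 frontier result rem
      = if frontier.items = [] ∨ rem = 0 then (frontier, result, rem) else (frontier, result, rem) := rfl

theorem pvLoopBSuccU (neighbors : List Int) (ip : Bool) (f : Nat) (frontier : PySem.Dict (Int × Int) Int)
    (result : PySem.Dict Int Int) (rem : Int) :
    pvLoopB neighbors ip (f + 1) frontier result rem
      = if frontier.items = [] ∨ rem = 0 then (frontier, result, rem)
        else pvLoopB neighbors ip f (pvExpand neighbors frontier.items) (pvFlushDead ip frontier.items result) (rem - 1) := rfl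

theorem pvFinalExit (neighbors : List Int) (ip : Bool) (f : Nat) (frontier : PySem.Dict (Int × Int) Int)
    (result : PySem.Dict Int Int) (rem : Int) (h : frontier.items = [] ∨ rem = 0) :
    pvFinal neighbors ip f frontier result rem
      = if rem = 0 then pvFlushAll frontier.items result else result := by
  unfold pvFinal
  cases f with
  | zero => rw [pvLoopBZeroU, if_pos h]
  | succ g => rw [pvLoopBSuccU, if_pos h]

theorem pvFinalZero (neighbors : List Int) (ip : Bool) (frontier : PySem.Dict (Int × Int) Int)
    (result : PySem.Dict Int Int) (rem : Int) :
    pvFinal neighbors ip 0 frontier result rem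
      = if rem = 0 then pvFlushAll frontier.items result else result := by
  unfold pvFinal
  rw [pvLoopBZeroU, ite_self]

theorem pvFinalStep (neighbors : List Int) (ip : Bool) (f : Nat) (frontier : PySem.Dict (Int × Int) Int)
    (result : PySem.Dict Int Int) (rem : Int) (hfr : ¬ frontier.items = []) (hrem : rem ≠ 0) :
    pvFinal neighbors ip (f + 1) frontier result rem
      = pvFinal neighbors ip f (pvExpand neighbors frontier.items) (pvFlushDead ip frontier.items result) (rem - 1) := by
  unfold pvFinal
  rw [pvLoopBSuccU, if_neg (not_or.mpr ⟨hfr, hrem⟩)]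

theorem pvContribZeroRem (neighbors : List Int) (ip : Bool) (f : Nat) (a s m : Int) :
    pvContrib neighbors ip f a s 0 m = if s = m then 1 else 0 := by
  unfold pvContrib
  rw [pvDfsA.eq_def]
  simp [PySem.Int.bor_zero]

theorem pvContribFuel0 (neighbors : List Int) (ip : Bool) (a s rem m : Int) (hrem : rem ≠ 0) :
    pvContrib neighbors ip 0 a s rem m = 0 := by
  unfold pvContrib
  rw [pvDfsA.eq_def]
  simp [hrem]

theorem pvContribDead (neighbors : List Int) (ip : Bool) (f : Nat) (s rem m : Int) (hrem : rem ≠ 0) :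
    pvContrib neighbors ip (f + 1) 0 s rem m = if ip = true ∧ s = m then 1 else 0 := by
  unfold pvContrib
  rw [pvDfsA.eq_def]
  cases ip <;> simp [hrem, PySem.Int.bor_zero]

theorem pvContribSucc (neighbors : List Int) (ip : Bool) (f : Nat) (a s rem m : Int)
    (hrem : rem ≠ 0) (ha : a ≠ 0) (hs : 0 ≤ s) :
    pvContrib neighbors ip (f + 1) a s rem m
      = ((iterSetBits a).map (fun (v : Nat) =>
          pvContrib neighbors ip f
            (PySem.Int.band a (Int.not (PySem.Int.bor ((1 : Int) <<< v) (pvNbr neighbors v))))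
            (PySem.Int.bor s ((1 : Int) <<< v)) (rem - 1) m)).sum := by
  unfold pvContrib
  rw [pvDfsASucc neighbors ip f a rem hrem ha]
  have hsorted : ((if (pvFoldW (pvME neighbors ip f a rem) PySem.Dict.empty).items = [] then []
        else PySem.List.sorted (pvFoldW (pvME neighbors ip f a rem) PySem.Dict.empty).items (fun p => p.1) false).map
        (fun p => if PySem.Int.bor s p.1 = m then p.2 else 0)).sum
      = ((pvFoldW (pvME neighbors ip f a rem) PySem.Dict.empty).items.map
          (fun p => if PySem.Int.bor s p.1 = m then p.2 else 0)).sum := by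
    by_cases hM : (pvFoldW (pvME neighbors ip f a rem) PySem.Dict.empty).items = []
    · rw [if_pos hM, hM]
    · rw [if_neg hM]
      exact ((PySem.List.sorted_perm _ _ _).map _).sum_eq
  rw [hsorted, pvFoldWSumIte (pvME neighbors ip f a rem) (fun y => PySem.Int.bor s y = m)]
  unfold pvME
  rw [pvSumFlatMap]
  apply congrArg
  apply List.map_congr_left
  intro v _
  rw [List.map_map]
  apply congrArg
  apply List.map_congr_left
  intro x hx
  have hxk : 0 ≤ x.1 := ((pvDfsAFacts neighbors ip f _ _).2 x hx).2
  simp only [Function.comp]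
  rw [pvBorRot s x.1 _ hs hxk (pvShiftNonneg v)]

theorem pvInvFlush (neighbors : List Int) (ip : Bool) (f : Nat)
    (frontier : PySem.Dict (Int × Int) Int) (result : PySem.Dict Int Int) (m : Int) :
    (pvFlushAll frontier.items result).getD m 0
      = result.getD m 0
        + (frontier.items.map (fun p => p.2 * pvContrib neighbors ip f p.1.1 p.1.2 0 m)).sum := by
  rw [pvFlushAllEq, pvFoldWGetD, List.map_map]
  congr 1
  apply congrArg
  apply List.map_congr_left
  intro p _
  rw [pvContribZeroRem]
  by_cases h : p.1.2 = m <;> simp [Function.comp, h]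

theorem pvInv (neighbors : List Int) (ip : Bool) :
    ∀ (f : Nat) (frontier : PySem.Dict (Int × Int) Int) (result : PySem.Dict Int Int) (rem : Int) (m : Int),
      (∀ p ∈ frontier.items, 0 ≤ p.1.2) →
      (pvFinal neighbors ip f frontier result rem).getD m 0
        = result.getD m 0
          + (frontier.items.map (fun p => p.2 * pvContrib neighbors ip f p.1.1 p.1.2 rem m)).sum := by
  intro f
  induction f with
  | zero =>
    intro frontier result rem m hsel
    rw [pvFinalZero]
    by_cases hrem : rem = 0
    · subst hrem
      rw [if_pos rfl]
      exact pvInvFlush neighbors ip 0 frontier result m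
    · rw [if_neg hrem]
      have hz : ∀ p ∈ frontier.items, p.2 * pvContrib neighbors ip 0 p.1.1 p.1.2 rem m = 0 := by
        intro p _
        rw [pvContribFuel0 neighbors ip _ _ _ _ hrem]
        ring
      rw [List.map_congr_left hz]
      simp
  | succ f ih =>
    intro frontier result rem m hsel
    by_cases hrem : rem = 0
    · subst hrem
      rw [pvFinalExit neighbors ip (f + 1) frontier result 0 (Or.inr rfl), if_pos rfl]
      exact pvInvFlush neighbors ip (f + 1) frontier result m
    by_cases hfr : frontier.items = []
    · rw [pvFinalExit neighbors ip (f + 1) frontier result rem (Or.inl hfr), if_neg hrem, hfr]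
      simp
    rw [pvFinalStep neighbors ip f frontier result rem hfr hrem]
    have hselE : ∀ p ∈ (pvExpand neighbors frontier.items).items, 0 ≤ p.1.2 := by
      intro p hp
      have hk := PySem.Dict.mem_keys_of_mem_items _ hp
      rw [pvExpandEq, pvFoldWKeys] at hk
      have hk2 : p.1 ∈ (pvE neighbors frontier.items).map (·.1) := by
        rcases (PySem.Set.mem_update _ _ _).mp hk with h | h
        · rw [show (PySem.Dict.empty : PySem.Dict (Int × Int) Int).keys = [] from rfl] at h; cases h
        · exact h
      rcases List.mem_map.mp hk2 with ⟨q, hq, he⟩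
      rcases List.mem_flatMap.mp hq with ⟨p0, hp0, hq2⟩
      by_cases h0 : p0.1.1 = 0
      · rw [if_pos h0] at hq2; cases hq2
      · rw [if_neg h0] at hq2
        rcases List.mem_map.mp hq2 with ⟨v, _, he2⟩
        rw [← he, ← he2]
        simp only [pvChild]
        exact pvBorNonneg _ _ (hsel p0 hp0) (pvShiftNonneg v)
    rw [ih (pvExpand neighbors frontier.items) (pvFlushDead ip frontier.items result) (rem - 1) m hselE]
    have hndE : (PySem.Dict.empty : PySem.Dict (Int × Int) Int).keys.Nodup := by
      rw [show (PySem.Dict.empty : PySem.Dict (Int × Int) Int).keys = [] from rfl]; exact List.nodup_nil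
    have hEsum : ((pvExpand neighbors frontier.items).items.map
        (fun p => p.2 * pvContrib neighbors ip f p.1.1 p.1.2 (rem - 1) m)).sum
        = ((pvE neighbors frontier.items).map
            (fun q => q.2 * pvContrib neighbors ip f q.1.1 q.1.2 (rem - 1) m)).sum := by
      rw [pvExpandEq]
      have h1 := pvFoldWSumItems (pvE neighbors frontier.items) PySem.Dict.empty hndE
        (fun k => pvContrib neighbors ip f k.1 k.2 (rem - 1) m)
      rw [show (PySem.Dict.empty : PySem.Dict (Int × Int) Int).items = [] from rfl] at h1
      simpa using h1
    rw [hEsum, pvFlushDeadEq, pvFoldWGetD]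
    rw [add_assoc]
    congr 1
    have hDL : (((frontier.items.filter (fun p => decide (p.1.1 = 0 ∧ ip = true))).map
          (fun p => (p.1.2, p.2))).map (fun q => if q.1 = m then q.2 else 0)).sum
        = (frontier.items.map
            (fun p => if (p.1.1 = 0 ∧ ip = true) ∧ p.1.2 = m then p.2 else 0)).sum := by
      rw [List.map_map, pvSumFilter]
      apply congrArg
      apply List.map_congr_left
      intro p _
      by_cases h1 : p.1.1 = 0 ∧ ip = true <;> by_cases h2 : p.1.2 = m <;>
        simp [Function.comp, h1, h2]
    rw [hDL]
    unfold pvE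
    rw [pvSumFlatMap, ← PySem.List.sum_map_add_int]
    apply congrArg
    apply List.map_congr_left
    intro p hp
    by_cases h0 : p.1.1 = 0
    · rw [if_pos h0]
      simp only [List.map_nil, List.sum_nil, add_zero]
      rw [h0, pvContribDead neighbors ip f p.1.2 rem m hrem]
      by_cases h1 : ip = true <;> by_cases h2 : p.1.2 = m <;> simp [h1, h2]
    · rw [if_neg h0]
      have hng : ¬((p.1.1 = 0 ∧ ip = true) ∧ p.1.2 = m) := fun h => h0 h.1.1
      rw [if_neg hng, zero_add,
        pvContribSucc neighbors ip f p.1.1 p.1.2 rem m hrem h0 (hsel p hp), pvMulSum, List.map_map]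
      apply congrArg
      apply List.map_congr_left
      intro v _
      simp [Function.comp, pvChild]

theorem pvGoodFlush (items : List ((Int × Int) × Int)) (result : PySem.Dict Int Int)
    (hf : ∀ p ∈ items, 0 < p.2) (hrn : result.keys.Nodup) (hrp : ∀ p ∈ result.items, 0 < p.2) :
    (pvFlushAll items result).keys.Nodup ∧ ∀ p ∈ (pvFlushAll items result).items, 0 < p.2 := by
  rw [pvFlushAllEq]
  refine ⟨pvFoldWNodup _ _ hrn, pvFoldWValPos _ _ hrn hrp ?_⟩
  intro q hq
  rcases List.mem_map.mp hq with ⟨p, hp, he⟩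
  rw [← he]
  exact hf p hp

theorem pvGood (neighbors : List Int) (ip : Bool) :
    ∀ (f : Nat) (frontier : PySem.Dict (Int × Int) Int) (result : PySem.Dict Int Int) (rem : Int),
      (∀ p ∈ frontier.items, 0 < p.2) → result.keys.Nodup → (∀ p ∈ result.items, 0 < p.2) →
      (pvFinal neighbors ip f frontier result rem).keys.Nodup
      ∧ (∀ p ∈ (pvFinal neighbors ip f frontier result rem).items, 0 < p.2) := by
  intro f
  induction f with
  | zero =>
    intro frontier result rem hf hrn hrp
    rw [pvFinalZero]
    by_cases hrem : rem = 0
    · rw [if_pos hrem]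
      exact pvGoodFlush frontier.items result hf hrn hrp
    · rw [if_neg hrem]
      exact ⟨hrn, hrp⟩
  | succ f ih =>
    intro frontier result rem hf hrn hrp
    by_cases hrem : rem = 0
    · rw [pvFinalExit neighbors ip (f + 1) frontier result rem (Or.inr hrem), if_pos hrem]
      exact pvGoodFlush frontier.items result hf hrn hrp
    by_cases hfr : frontier.items = []
    · rw [pvFinalExit neighbors ip (f + 1) frontier result rem (Or.inl hfr), if_neg hrem]
      exact ⟨hrn, hrp⟩
    rw [pvFinalStep neighbors ip f frontier result rem hfr hrem]
    have hndE : (PySem.Dict.empty : PySem.Dict (Int × Int) Int).keys.Nodup := by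
      rw [show (PySem.Dict.empty : PySem.Dict (Int × Int) Int).keys = [] from rfl]; exact List.nodup_nil
    apply ih
    · rw [pvExpandEq]
      refine pvFoldWValPos _ _ hndE ?_ ?_
      · intro p hp
        rw [show (PySem.Dict.empty : PySem.Dict (Int × Int) Int).items = [] from rfl] at hp
        cases hp
      · intro q hq
        rcases List.mem_flatMap.mp hq with ⟨p0, hp0, hq2⟩
        by_cases h0 : p0.1.1 = 0
        · rw [if_pos h0] at hq2; cases hq2
        · rw [if_neg h0] at hq2
          rcases List.mem_map.mp hq2 with ⟨v, _, he2⟩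
          rw [← he2]
          exact hf p0 hp0
    · rw [pvFlushDeadEq]
      exact pvFoldWNodup _ _ hrn
    · rw [pvFlushDeadEq]
      refine pvFoldWValPos _ _ hrn hrp ?_
      intro q hq
      rcases List.mem_map.mp hq with ⟨p, hp, he⟩
      rw [← he]
      exact hf p (List.mem_of_mem_filter hp)

-- ---- endgame: two strictly key-sorted positive association lists with equal
-- weighted lookups are equal ----
def pvLS (l : List (Int × Int)) (m : Int) : Int := (l.map (fun p => if p.1 = m then p.2 else 0)).sum

theorem pvLSCons (p : Int × Int) (l : List (Int × Int)) (m : Int) :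
    pvLS (p :: l) m = (if p.1 = m then p.2 else 0) + pvLS l m := by
  simp [pvLS]

theorem pvLSZero (l : List (Int × Int)) (m : Int) (h : ∀ p ∈ l, p.1 ≠ m) : pvLS l m = 0 := by
  induction l with
  | nil => simp [pvLS]
  | cons p t ih =>
    rw [pvLSCons, if_neg (h p List.mem_cons_self), ih (fun q hq => h q (List.mem_cons_of_mem _ hq))]
    ring

theorem pvLSGetD (d : PySem.Dict Int Int) (hnd : d.keys.Nodup) (m : Int) :
    pvLS d.items m = d.getD m 0 := by
  rw [PySem.Dict.items_eq_map_keys d hnd 0]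
  unfold pvLS
  rw [List.map_map]
  have he : (List.map ((fun p : Int × Int => if p.1 = m then p.2 else 0) ∘ fun k => (k, d.getD k 0)) d.keys).sum
      = (List.map (fun k => if k = m then d.getD k 0 else 0) d.keys).sum := by
    apply congrArg
    apply List.map_congr_left
    intro k _
    by_cases h : k = m <;> simp [Function.comp, h]
  rw [he]
  by_cases hc : m ∈ d.keys
  · simpa using pvSumIteMem d.keys (fun k => d.getD k 0) m hnd hc
  · have h2 : d.getD m 0 = 0 := by
      refine PySem.Dict.getD_of_not_contains _ _ ?_
      rcases h3 : d.contains m with _ | _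
      · rfl
      · exact absurd ((PySem.Dict.contains_iff_mem_keys _ _).mp h3) hc
    rw [h2]
    simpa using pvSumIteNotMem d.keys (fun k => d.getD k 0) m hc

theorem pvAssocEq : ∀ (l₁ l₂ : List (Int × Int)),
    l₁.Pairwise (fun p q => p.1 < q.1) → l₂.Pairwise (fun p q => p.1 < q.1) →
    (∀ p ∈ l₁, 0 < p.2) → (∀ p ∈ l₂, 0 < p.2) →
    (∀ m, pvLS l₁ m = pvLS l₂ m) → l₁ = l₂ := by
  intro l₁
  induction l₁ with
  | nil =>
    intro l₂ _ h2 _ hp2 hls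
    cases l₂ with
    | nil => rfl
    | cons q t =>
      exfalso
      have hqt : ∀ r ∈ t, q.1 < r.1 := (List.pairwise_cons.mp h2).1
      have ht0 : pvLS t q.1 = 0 := pvLSZero t q.1 (fun r hr => ne_of_gt (hqt r hr))
      have hq : pvLS (q :: t) q.1 = q.2 := by rw [pvLSCons, if_pos rfl, ht0]; ring
      have := hls q.1
      rw [hq] at this
      have hpos := hp2 q List.mem_cons_self
      simp [pvLS] at this
      omega
  | cons p t1 ih =>
    intro l₂ h1 h2 hp1 hp2 hls
    have hpt1 : ∀ r ∈ t1, p.1 < r.1 := (List.pairwise_cons.mp h1).1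
    have hLS1p : pvLS (p :: t1) p.1 = p.2 := by
      rw [pvLSCons, if_pos rfl, pvLSZero t1 p.1 (fun r hr => ne_of_gt (hpt1 r hr))]
      ring
    cases l₂ with
    | nil =>
      exfalso
      have := hls p.1
      rw [hLS1p] at this
      have hpos := hp1 p List.mem_cons_self
      simp [pvLS] at this
      omega
    | cons q t2 =>
      have hqt2 : ∀ r ∈ t2, q.1 < r.1 := (List.pairwise_cons.mp h2).1
      have hLS2q : pvLS (q :: t2) q.1 = q.2 := by
        rw [pvLSCons, if_pos rfl, pvLSZero t2 q.1 (fun r hr => ne_of_gt (hqt2 r hr))]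
        ring
      have hkey : p.1 = q.1 := by
        by_contra hne
        rcases lt_trichotomy p.1 q.1 with hlt | he | hgt
        · have hz : pvLS (q :: t2) p.1 = 0 := by
            refine pvLSZero _ _ ?_
            intro r hr
            rcases List.mem_cons.mp hr with h | h
            · rw [h]; exact ne_of_gt hlt
            · exact ne_of_gt (lt_trans hlt (hqt2 r h))
          have := hls p.1
          rw [hLS1p, hz] at this
          have hpos := hp1 p List.mem_cons_self
          omega
        · exact hne he
        · have hz : pvLS (p :: t1) q.1 = 0 := by
            refine pvLSZero _ _ ?_
            intro r hr
            rcases List.mem_cons.mp hr with h | h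
            · rw [h]; exact ne_of_gt hgt
            · exact ne_of_gt (lt_trans hgt (hpt1 r h))
          have := hls q.1
          rw [hLS2q, hz] at this
          have hpos := hp2 q List.mem_cons_self
          omega
      have hval : p.2 = q.2 := by
        have := hls p.1
        rw [hLS1p] at this
        rw [this, hkey, hLS2q]
      have htail : ∀ m, pvLS t1 m = pvLS t2 m := by
        intro m
        by_cases hm : m = p.1
        · rw [hm, pvLSZero t1 p.1 (fun r hr => ne_of_gt (hpt1 r hr)),
              pvLSZero t2 p.1 (fun r hr => by rw [← hkey] at hqt2; exact ne_of_gt (hqt2 r hr))]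
        · have := hls m
          rw [pvLSCons, pvLSCons, if_neg (fun h => hm h.symm),
              if_neg (fun h => hm (by rw [← hkey] at h; exact h.symm))] at this
          omega
      have hteq := ih t2 (List.Pairwise.of_cons h1) (List.Pairwise.of_cons h2)
        (fun r hr => hp1 r (List.mem_cons_of_mem _ hr))
        (fun r hr => hp2 r (List.mem_cons_of_mem _ hr)) htail
      rw [hteq, Prod.ext_iff.mpr ⟨hkey, hval⟩]

-- ===== VERDICT (by name: the statement is the Claim_ definition above) =====
theorem compute_exact_outcomes_spec : Claim_equal_compute_exact_outcomes := by
  intro neighbors axes ip _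
  unfold Spec_compute_exact_outcomes
  show pvDfsA neighbors ip (neighbors.length + 2) (((1 : Int) <<< neighbors.length) - 1) axes
    = compute_exact_outcomes_alt neighbors axes ip
  have hBeq : compute_exact_outcomes_alt neighbors axes ip
      = PySem.List.sorted (pvFinal neighbors ip (neighbors.length + 2)
          ((PySem.Dict.empty).insert ((((1 : Int) <<< neighbors.length) - 1), (0 : Int)) 1)
          PySem.Dict.empty axes).items (fun p => p.1) false := rfl
  rw [hBeq]
  set n := neighbors.length with hn
  set full := ((1 : Int) <<< n) - 1 with hfull
  set F0 : PySem.Dict (Int × Int) Int := (PySem.Dict.empty).insert (full, (0 : Int)) 1 with hF0d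
  set R := pvFinal neighbors ip (n + 2) F0 PySem.Dict.empty axes with hRd
  have hF0 : F0.items = [((full, (0 : Int)), (1 : Int))] := by
    rw [hF0d, PySem.Dict.items_insert_of_not_contains _ _ (PySem.Dict.contains_empty _)]
    rfl
  have hsel0 : ∀ p ∈ F0.items, 0 ≤ p.1.2 := by
    rw [hF0]
    intro p hp
    rw [List.mem_singleton.mp hp]
  have hfc : ∀ p ∈ F0.items, 0 < p.2 := by
    rw [hF0]
    intro p hp
    rw [List.mem_singleton.mp hp]
    norm_num
  have hndE : (PySem.Dict.empty : PySem.Dict Int Int).keys.Nodup := by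
    rw [show (PySem.Dict.empty : PySem.Dict Int Int).keys = [] from rfl]; exact List.nodup_nil
  have hGood := pvGood neighbors ip (n + 2) F0 PySem.Dict.empty axes hfc hndE
    (by intro p hp; rw [show (PySem.Dict.empty : PySem.Dict Int Int).items = [] from rfl] at hp; cases hp)
  have hIm : ∀ m, R.getD m 0 = pvLS (pvDfsA neighbors ip (n + 2) full axes) m := by
    intro m
    rw [hRd, pvInv neighbors ip (n + 2) F0 PySem.Dict.empty axes m hsel0, hF0,
        PySem.Dict.getD_empty]
    simp only [List.map_cons, List.map_nil, List.sum_cons, List.sum_nil, zero_add, add_zero, one_mul]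
    unfold pvContrib pvLS
    apply congrArg
    apply List.map_congr_left
    intro x _
    rw [PySem.Int.bor_comm, PySem.Int.bor_zero]
  have hAf := pvDfsAFacts neighbors ip (n + 2) full axes
  apply pvAssocEq
  · exact hAf.1
  · have h1 := PySem.List.sorted_pairwise R.items (fun p => p.1)
    have h2 : ((PySem.List.sorted R.items (fun p => p.1) false).map Prod.fst).Nodup := by
      refine ((PySem.List.sorted_perm _ _ _).map Prod.fst).nodup_iff.mpr ?_
      rw [show R.items.map Prod.fst = R.keys from rfl]
      exact hGood.1
    exact pvPairwiseLt _ h1 h2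
  · exact fun p hp => (hAf.2 p hp).1
  · intro p hp
    exact hGood.2 p ((PySem.List.mem_sorted _ _ _ _).mp hp)
  · intro m
    have hperm : pvLS (PySem.List.sorted R.items (fun p => p.1) false) m = pvLS R.items m := by
      unfold pvLS
      exact ((PySem.List.sorted_perm _ _ _).map _).sum_eq
    rw [hperm, pvLSGetD R hGood.1 m, hIm m]
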